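-- pv_equiv track=rewrite | github.com/jbwincek/Plie | experimental/speed_tests.py | join_all_at_once
-- ===== SOURCE A (Python) =====
-- def join_all_at_once(size = (40,40)):
--     blank_dict = {}
--     output_list = []
--     for y in range(size[1]):
--         if y > 0:
--             output_list.append('\n')
--         output_list.extend([blank_dict.get((x, y), '.') for x in range(size[0])])
--     return ''.join(output_list)
-- ===== SOURCE B (Python) =====
-- def join_all_at_once(size = (40,40)):
--     return '\n'.join('.' * size[0] for _ in range(size[1]))
-- ===== Notes on version B (the rewrite author's own statement) =====
-- stated objective: simpler
-- what changed: Replaced the flat per-character list with dict.get inner loop and manual newline appending by building each row in closed form ('.' * width) and joining the rows with '\n'.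
import Mathlib
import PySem

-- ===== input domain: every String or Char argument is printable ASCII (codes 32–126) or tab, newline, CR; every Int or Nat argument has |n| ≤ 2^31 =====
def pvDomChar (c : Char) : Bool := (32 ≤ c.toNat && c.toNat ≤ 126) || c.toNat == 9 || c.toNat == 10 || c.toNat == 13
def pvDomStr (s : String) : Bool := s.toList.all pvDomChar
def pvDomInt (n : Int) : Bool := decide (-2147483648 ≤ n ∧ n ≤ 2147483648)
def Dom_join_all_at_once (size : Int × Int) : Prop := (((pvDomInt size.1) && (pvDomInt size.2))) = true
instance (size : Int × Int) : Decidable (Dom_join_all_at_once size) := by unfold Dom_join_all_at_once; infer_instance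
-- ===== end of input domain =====

-- B builds each row in closed form and joins the rows with '\n'; A builds a flat per-character list with a dict lookup per cell (objective: simpler).

-- ===== PORT A =====
def join_all_at_once (size : Int × Int) : String :=
  let blank_dict : PySem.Dict (Int × Int) String := PySem.Dict.empty
  let output_list : List String :=
    (PySem.List.pyRange 0 size.2 1).foldl
      (fun acc y =>
        let acc := if y > 0 then acc ++ ["\n"] else acc
        acc ++ (PySem.List.pyRange 0 size.1 1).map (fun x => PySem.Dict.getD blank_dict (x, y) "."))
      []
  PySem.Str.join "" output_list

-- ===== PORT B =====
def join_all_at_once_alt (size : Int × Int) : String :=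
  PySem.Str.join "\n"
    ((PySem.List.pyRange 0 size.2 1).map (fun _ => String.ofList (List.replicate size.1.toNat '.')))

-- ===== PRECONDITION & SPEC =====
def Spec_join_all_at_once (size : Int × Int) (out : String) : Prop := out = join_all_at_once_alt size
instance (size : Int × Int) (out : String) : Decidable (Spec_join_all_at_once size out) := by unfold Spec_join_all_at_once; infer_instance

-- ===== CLAIM (what is proved, stated in full; the proofs are below) =====
def Claim_equal_join_all_at_once : Prop := ∀ (size : Int × Int), Dom_join_all_at_once size → Spec_join_all_at_once size (join_all_at_once size)

-- ===== LEMMAS AND PROOFS =====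

-- ''.join at the char level is flatten
theorem chars_join_empty (xss : List (List Char)) :
    PySem.Chars.join [] xss = xss.flatten := by
  induction xss with
  | nil => exact PySem.Chars.join_nil []
  | cons p rest ih =>
      cases rest with
      | nil => simp [PySem.Chars.join_singleton]
      | cons q rest' =>
          rw [PySem.Chars.join_cons_cons, ih]
          simp

-- sep.join over a snoc
theorem chars_join_snoc (sep : List Char) (xss : List (List Char)) (x : List Char) :
    PySem.Chars.join sep (xss ++ [x]) =
      (if xss = [] then x else PySem.Chars.join sep xss ++ sep ++ x) := by
  induction xss with
  | nil => simp [PySem.Chars.join_singleton]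
  | cons p rest ih =>
      cases rest with
      | nil => simp [PySem.Chars.join_cons_cons, PySem.Chars.join_singleton]
      | cons q rest' =>
          rw [show p :: q :: rest' ++ [x] = p :: q :: (rest' ++ [x]) from rfl,
              PySem.Chars.join_cons_cons,
              show q :: (rest' ++ [x]) = (q :: rest') ++ [x] from rfl, ih,
              if_neg (by simp), if_neg (by simp), PySem.Chars.join_cons_cons]
          simp

theorem flatten_replicate_singleton (m : Nat) (c : Char) :
    (List.replicate m [c]).flatten = List.replicate m c := by
  induction m with
  | zero => rfl
  | succ k ih => simp [List.replicate_succ, ih]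

-- one row of A's flat list is width many "." strings
theorem row_map_const (w : Int) (y : Int) :
    (PySem.List.pyRange 0 w 1).map
      (fun x => PySem.Dict.getD (PySem.Dict.empty : PySem.Dict (Int × Int) String) (x, y) ".")
      = List.replicate w.toNat "." := by
  have h : (PySem.List.pyRange 0 w 1).map
      (fun x => PySem.Dict.getD (PySem.Dict.empty : PySem.Dict (Int × Int) String) (x, y) ".")
      = (PySem.List.pyRange 0 w 1).map (fun _ => ".") := by
    simp [PySem.Dict.getD_empty]
  rw [h, List.map_const', PySem.List.length_pyRange_one]
  simp

theorem main_lemma (w : Int) (n : Nat) :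
    ((((PySem.List.pyRange 0 (n : Int) 1).foldl
      (fun acc y =>
        (if y > 0 then acc ++ ["\n"] else acc)
          ++ (PySem.List.pyRange 0 w 1).map
              (fun x => PySem.Dict.getD (PySem.Dict.empty : PySem.Dict (Int × Int) String) (x, y) "."))
      []).map String.toList).flatten
    = PySem.Chars.join ['\n'] (List.replicate n (List.replicate w.toNat '.'))) := by
  induction n with
  | zero =>
      simp [PySem.Chars.join_nil]
  | succ k ih =>
      have hsplit : PySem.List.pyRange 0 ((k + 1 : Nat) : Int) 1
          = PySem.List.pyRange 0 (k : Int) 1 ++ [(k : Int)] := by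
        push_cast
        exact PySem.List.pyRange_one_succ_right (by positivity)
      rw [hsplit, List.foldl_append, List.foldl_cons, List.foldl_nil, row_map_const,
          List.replicate_succ', chars_join_snoc]
      have hrow : ((List.replicate w.toNat ("." : String)).map String.toList).flatten
          = List.replicate w.toNat '.' := by
        rw [List.map_replicate]
        exact flatten_replicate_singleton _ _
      rcases Nat.eq_zero_or_pos k with hk | hk
      · subst hk
        simp only [Nat.cast_zero, List.replicate_zero]
        have : ¬ ((0 : Int) > 0) := by omega
        rw [if_neg this]
        simpa using hrow
      · have hpos : ((k : Int) > 0) := by exact_mod_cast hk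
        have hne : (List.replicate k (List.replicate w.toNat '.')) ≠ [] := by
          intro hc
          have := congrArg List.length hc
          simp at this
          omega
        rw [if_pos hpos, if_neg hne, ← ih]
        simp

-- ===== VERDICT (by name: the statement is the Claim_ definition above) =====
theorem join_all_at_once_spec : Claim_equal_join_all_at_once := by
  intro size _
  unfold Spec_join_all_at_once join_all_at_once join_all_at_once_alt
  rw [← String.toList_inj, PySem.Str.toList_join, PySem.Str.toList_join]
  rcases Int.le_total size.2 0 with h | h
  · rw [PySem.List.pyRange_one_eq_nil h]
    rfl
  · have h2 : size.2 = ((size.2.toNat : Nat) : Int) := by omega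
    rw [h2]
    have hB : ((PySem.List.pyRange 0 ((size.2.toNat : Nat) : Int) 1).map
        (fun _ => String.ofList (List.replicate size.1.toNat '.'))).map String.toList
        = List.replicate size.2.toNat (List.replicate size.1.toNat '.') := by
      rw [List.map_map]
      have : (String.toList ∘ fun _ => String.ofList (List.replicate size.1.toNat '.'))
          = fun (_ : Int) => List.replicate size.1.toNat '.' := by
        funext z
        simp
      rw [this, List.map_const', PySem.List.length_pyRange_one]
      norm_num
      omega
    rw [hB]
    have := main_lemma size.1 size.2.toNat
    simpa [chars_join_empty] using this
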